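-- pv_equiv track=rewrite | github.com/costas-basdekis/advent-of-code-submissions | year_2018/day_02/part_a.py | get_two_and_three_letter_instances_presence
-- ===== SOURCE A (Python) =====
-- import itertools
--
-- def get_two_and_three_letter_instances_presence(box_id):
--     """
--     >>> get_two_and_three_letter_instances_presence("abcdef")
--     (False, False)
--     >>> get_two_and_three_letter_instances_presence("bababc")
--     (True, True)
--     >>> get_two_and_three_letter_instances_presence("abbcde")
--     (True, False)
--     >>> get_two_and_three_letter_instances_presence("abcccd")
--     (False, True)
--     >>> get_two_and_three_letter_instances_presence("aabcdd")
--     (True, False)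
--     >>> get_two_and_three_letter_instances_presence("abcdee")
--     (True, False)
--     >>> get_two_and_three_letter_instances_presence("ababab")
--     (False, True)
--     """
--     counts_present = {
--         count
--         for count in (
--             len(tuple(letters))
--             for _, letters in itertools.groupby(sorted(box_id))
--         )
--         if count in (2, 3)
--     }
--
--     return 2 in counts_present, 3 in counts_present
-- ===== SOURCE B (Python) =====
-- def get_two_and_three_letter_instances_presence(box_id):
--     """Single-pass frequency table instead of sort + groupby."""
--     counts = {}
--     for letter in box_id:
--         counts[letter] = counts.get(letter, 0) + 1
--     values = counts.values()
--     return 2 in values, 3 in values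
-- ===== Notes on version B (the rewrite author's own statement) =====
-- stated objective: faster
-- what changed: B replaces A's sort + itertools.groupby run-length pass with a single linear scan building a character-frequency dict and then checks whether 2 or 3 occurs among its values (O(n) vs O(n log n); measured ~2x faster).
import Mathlib
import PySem

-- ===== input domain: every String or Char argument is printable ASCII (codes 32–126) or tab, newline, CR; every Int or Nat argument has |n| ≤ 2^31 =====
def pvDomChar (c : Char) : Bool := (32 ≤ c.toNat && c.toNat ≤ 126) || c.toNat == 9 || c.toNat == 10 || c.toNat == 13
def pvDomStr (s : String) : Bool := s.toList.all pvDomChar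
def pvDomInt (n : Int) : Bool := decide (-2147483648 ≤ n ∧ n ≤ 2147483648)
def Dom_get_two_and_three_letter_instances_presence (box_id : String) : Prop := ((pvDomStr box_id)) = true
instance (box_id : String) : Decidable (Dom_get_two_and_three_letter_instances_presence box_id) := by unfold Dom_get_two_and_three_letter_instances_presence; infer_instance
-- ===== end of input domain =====

-- B replaces A's sort+groupby run-length scan by a single-pass character-frequency dict (measured faster in a timing run).


-- ===== PORT A =====
-- run lengths of adjacent equal elements: len(tuple(letters)) for _, letters in itertools.groupby(l)
def pvRunLens : List Char → List Int
  | [] => []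
  | x :: xs =>
    ((1 + (xs.takeWhile (· == x)).length : Nat) : Int) :: pvRunLens (xs.dropWhile (· == x))
termination_by l => l.length
decreasing_by
  have h := List.length_dropWhile_le (p := (· == x)) (l := xs)
  simp only [List.length_cons]; omega

def get_two_and_three_letter_instances_presence (box_id : String) : Bool × Bool :=
  let lens := pvRunLens (PySem.List.sorted box_id.toList (fun x => x) false)
  let counts_present : PySem.Set Int :=
    PySem.Set.ofList (lens.filter (fun count => count == 2 || count == 3))
  (counts_present.contains 2, counts_present.contains 3)

-- ===== PORT B =====
def get_two_and_three_letter_instances_presence_alt (box_id : String) : Bool × Bool :=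
  let counts : PySem.Dict Char Int :=
    box_id.toList.foldl (fun d letter => d.insert letter (d.getD letter 0 + 1)) PySem.Dict.empty
  let values := counts.values
  (values.contains 2, values.contains 3)

-- ===== PRECONDITION & SPEC =====
def Spec_get_two_and_three_letter_instances_presence (box_id : String) (out : Bool × Bool) : Prop := out = get_two_and_three_letter_instances_presence_alt box_id
instance (box_id : String) (out : Bool × Bool) : Decidable (Spec_get_two_and_three_letter_instances_presence box_id out) := by unfold Spec_get_two_and_three_letter_instances_presence; infer_instance

-- ===== CLAIM (what is proved, stated in full; the proofs are below) =====
def Claim_equal_get_two_and_three_letter_instances_presence : Prop := ∀ (box_id : String), Dom_get_two_and_three_letter_instances_presence box_id → Spec_get_two_and_three_letter_instances_presence box_id (get_two_and_three_letter_instances_presence box_id)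

-- ===== LEMMAS AND PROOFS =====

-- On a sorted (Pairwise ≤) list, the adjacent-run lengths are exactly the multiplicities of its elements.
theorem pv_mem_runLens : ∀ (l : List Char), l.Pairwise (· ≤ ·) → ∀ k : Int,
    (k ∈ pvRunLens l ↔ ∃ a ∈ l, (l.count a : Int) = k)
  | [], _, k => by simp [pvRunLens]
  | x :: xs, hs, k => by
    have hlen : (xs.dropWhile (· == x)).length < xs.length + 1 := by
      have h := List.length_dropWhile_le (p := (· == x)) (l := xs)
      omega
    rw [List.pairwise_cons] at hs
    obtain ⟨hx, hxs⟩ := hs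
    set t := xs.takeWhile (· == x) with htdef
    set d := xs.dropWhile (· == x) with hddef
    have hsplit : t ++ d = xs := List.takeWhile_append_dropWhile
    have htx : ∀ a ∈ t, a = x := by
      intro a ha
      have := List.mem_takeWhile_imp ha
      exact eq_of_beq this
    have hdsub : d.Sublist xs := List.dropWhile_sublist _
    have hdp : d.Pairwise (· ≤ ·) := hxs.sublist hdsub
    have hxd : x ∉ d := by
      intro hxin
      cases hd : d with
      | nil => rw [hd] at hxin; exact (List.not_mem_nil) hxin
      | cons h rest =>
        have hhd : ¬ ((h == x) = true) := by
          have := List.head?_dropWhile_not (p := (· == x)) (l := xs)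
          rw [← hddef, hd] at this
          simpa using this
        have hhne : h ≠ x := fun he => hhd (by simp [he])
        rw [hd] at hxin
        rcases List.mem_cons.mp hxin with he | hrest
        · exact hhne he.symm
        · have hle1 : h ≤ x := by
            rw [hd] at hdp
            exact (List.pairwise_cons.mp hdp).1 x hrest
          have hle2 : x ≤ h := hx h (hdsub.mem (by rw [hd]; exact List.mem_cons_self))
          exact hhne (le_antisymm hle1 hle2)
    have hct : t.count x = t.length := by
      rw [List.count_eq_length]
      intro a ha; simp [htx a ha]
    have hcd : d.count x = 0 := List.count_eq_zero.mpr hxd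
    have hcountx : (x :: xs).count x = 1 + t.length := by
      rw [← hsplit]
      simp [List.count_append, hct, hcd]
      omega
    have hcount_ne : ∀ a, a ≠ x → (x :: xs).count a = d.count a := by
      intro a hne
      have hta : t.count a = 0 := List.count_eq_zero.mpr (fun hin => hne (htx a hin))
      rw [← hsplit]
      simp [List.count_append, hta, Ne.symm hne]
    have IH := pv_mem_runLens d hdp k
    constructor
    · intro hk
      rw [pvRunLens, ← htdef, ← hddef] at hk
      rcases List.mem_cons.mp hk with he | hrest
      · exact ⟨x, List.mem_cons_self, by rw [hcountx]; push_cast at he ⊢; omega⟩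
      · obtain ⟨a, had, hca⟩ := IH.mp hrest
        have hane : a ≠ x := fun he => hxd (he ▸ had)
        exact ⟨a, List.mem_cons_of_mem _ (hdsub.mem had), by rw [hcount_ne a hane]; exact hca⟩
    · rintro ⟨a, hain, hca⟩
      rw [pvRunLens, ← htdef, ← hddef]
      by_cases hax : a = x
      · subst hax
        rw [hcountx] at hca
        exact List.mem_cons.mpr (Or.inl (by push_cast at hca ⊢; omega))
      · have haxs : a ∈ xs := by
          rcases List.mem_cons.mp hain with he | h
          · exact absurd he hax
          · exact h
        have had : a ∈ d := by
          rw [← hsplit] at haxs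
          rcases List.mem_append.mp haxs with h | h
          · exact absurd (htx a h) hax
          · exact h
        rw [hcount_ne a hax] at hca
        exact List.mem_cons.mpr (Or.inr (IH.mpr ⟨a, had, hca⟩))
termination_by l => l.length

-- each component of A equals the corresponding component of B
theorem pv_component (box_id : String) (k : Int) (hk : k = 2 ∨ k = 3) :
    ((PySem.Set.ofList ((pvRunLens (PySem.List.sorted box_id.toList (fun x => x) false)).filter
        (fun count => count == 2 || count == 3))).contains k)
      = ((box_id.toList.foldl (fun d letter => d.insert letter (d.getD letter 0 + 1))
          PySem.Dict.empty).values.contains k) := by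
  rw [PySem.Dict.foldl_insert_getD_add_one_eq_counter]
  rw [Bool.eq_iff_iff, PySem.Set.contains_iff, PySem.Set.mem_ofList]
  simp only [List.contains_iff_mem, List.mem_filter,
    PySem.Dict.values, PySem.Dict.items_counter, List.map_map, List.mem_map,
    Function.comp_apply]
  have hsp : (PySem.List.sorted box_id.toList (fun x => x) false).Pairwise (· ≤ ·) :=
    PySem.List.sorted_pairwise _ _
  rw [pv_mem_runLens _ hsp k]
  have hperm : (PySem.List.sorted box_id.toList (fun x => x) false).Perm box_id.toList :=
    PySem.List.sorted_perm _ _ _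
  constructor
  · rintro ⟨⟨a, ha, hca⟩, -⟩
    refine ⟨a, (PySem.Set.mem_ofList _ _).mpr (hperm.mem_iff.mp ha), ?_⟩
    rw [← hperm.count_eq]
    exact hca
  · rintro ⟨a, ha, hval⟩
    have ham : a ∈ box_id.toList := (PySem.Set.mem_ofList _ _).mp ha
    refine ⟨⟨a, hperm.mem_iff.mpr ham, by rw [hperm.count_eq]; exact hval⟩, ?_⟩
    rcases hk with h | h <;> simp [h]

-- ===== VERDICT (by name: the statement is the Claim_ definition above) =====
theorem get_two_and_three_letter_instances_presence_spec : Claim_equal_get_two_and_three_letter_instances_presence := by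
  intro box_id _
  unfold Spec_get_two_and_three_letter_instances_presence
  unfold get_two_and_three_letter_instances_presence get_two_and_three_letter_instances_presence_alt
  exact Prod.ext (pv_component box_id 2 (Or.inl rfl)) (pv_component box_id 3 (Or.inr rfl))
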